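-- pv_equiv track=rewrite | github.com/Huch0/algorithm_community | 2월2주차/20240217PCCP3.py | backspace
-- ===== SOURCE A (Python) =====
-- def backspace(s):
--     while s[0] == "-":
--         s = s[1:]
--     i = len(s) - 1
--     while i > 0: ### 틀린 부분, i의 값을 케이스에 맞게 조절하기 위해 for문이 아닌 while문 이용
--         if s[i] == "-":
--             if s[i-1] == "-":
--                 s = s[:i] + s[i+1:]
--             else:
--                 s = s[:i-1] + s[i+1:] # 파이썬의 슬라이싱은 범위를 넘어가도 자동으로 처리해줌 (슬라이싱에서 out of range가 발생하진 않음)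
--                 i = i-1
--         i = i-1
--     return s
-- ===== SOURCE B (Python) =====
-- def backspace(s):
--     t = s.lstrip("-")
--     out = [c for c, nxt in zip(t, t[1:]) if c != "-" and nxt != "-"]
--     if t and t[-1] != "-":
--         out.append(t[-1])
--     return "".join(out)
-- ===== Notes on version B (the rewrite author's own statement) =====
-- stated objective: alternative
-- what changed: A repeatedly deletes characters by re-slicing the string inside a right-to-left index loop; B does one left-to-right pass after lstrip, keeping each non-dash character whose successor is not a dash, since every maximal dash run deletes exactly itself plus the one preceding character.
-- outside the precondition, e.g. on backspace('-'): A raises IndexError, B returns ''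
import Mathlib
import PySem

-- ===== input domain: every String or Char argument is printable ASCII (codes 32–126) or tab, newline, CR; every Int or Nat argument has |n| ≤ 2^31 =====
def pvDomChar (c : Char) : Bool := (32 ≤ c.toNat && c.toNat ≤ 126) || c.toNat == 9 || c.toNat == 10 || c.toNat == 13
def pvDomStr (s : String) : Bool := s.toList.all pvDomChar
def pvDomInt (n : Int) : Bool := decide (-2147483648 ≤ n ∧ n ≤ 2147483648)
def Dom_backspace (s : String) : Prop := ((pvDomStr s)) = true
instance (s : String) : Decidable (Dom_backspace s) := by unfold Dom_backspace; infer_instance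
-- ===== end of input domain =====

-- B replaces A's right-to-left delete-by-reslicing index loop with a single left-to-right pass
-- keeping each non-dash char whose successor is not a dash (objective: alternative).

-- ===== PORT A =====
-- while s[0] == "-": s = s[1:]   (s[0] raises IndexError once s is exhausted — all-dash strings;
-- those inputs are outside Pre_backspace, here the port just returns [])
def pvStripA : List Char → List Char
  | [] => []
  | c :: cs => if c = '-' then pvStripA cs else c :: cs

-- the index-decreasing while loop, literal (slices/indexing via PySem)
def pvLoopA (s : List Char) (i : Int) : List Char :=
  if i > 0 then
    if PySem.List.pyGet? s i = some '-' then
      if PySem.List.pyGet? s (i - 1) = some '-' then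
        pvLoopA (PySem.List.slice s none (some i) ++ PySem.List.slice s (some (i + 1)) none) (i - 1)
      else
        pvLoopA (PySem.List.slice s none (some (i - 1)) ++ PySem.List.slice s (some (i + 1)) none)
          ((i - 1) - 1)
    else pvLoopA s (i - 1)
  else s
termination_by i.toNat
decreasing_by all_goals omega

def backspace (s : String) : String :=
  let t := pvStripA s.toList
  String.mk (pvLoopA t ((t.length : Int) - 1))

-- ===== PORT B =====
-- the comprehension over zip(t, t[1:]) plus the final-char append from Source B
def pvCollectB (t : List Char) : List Char :=
  (t.zip (t.drop 1)).foldl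
    (fun out p => if p.1 ≠ '-' ∧ p.2 ≠ '-' then out ++ [p.1] else out) []
  ++ (match t.getLast? with
      | some c => if c ≠ '-' then [c] else []
      | none => [])

def backspace_alt (s : String) : String :=
  let t := s.toList.dropWhile (· = '-')  -- t = s.lstrip("-")
  String.mk (pvCollectB t)

-- ===== PRECONDITION & SPEC =====
-- A raises IndexError exactly on strings consisting only of '-' (including ""): Pre_ excludes those.
def Pre_backspace (s : String) : Prop := s.toList.any (· ≠ '-') = true
instance (s : String) : Decidable (Pre_backspace s) := by unfold Pre_backspace; infer_instance
def pvWitness_backspace : String := "ab--c-"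

def Spec_backspace (s : String) (out : String) : Prop := out = backspace_alt s
instance (s : String) (out : String) : Decidable (Spec_backspace s out) := by unfold Spec_backspace; infer_instance

-- ===== CLAIM (what is proved, stated in full; the proofs are below) =====
def Claim_equal_backspace : Prop := ∀ (s : String), Dom_backspace s → Pre_backspace s → Spec_backspace s (backspace s)

-- ===== LEMMAS AND PROOFS =====

-- the common value of both programs: keep a non-dash char iff its successor is not a dash
def pvKeep : List Char → List Char
  | [] => []
  | [c] => if c = '-' then [] else [c]
  | c :: d :: r => (if c ≠ '-' ∧ d ≠ '-' then [c] else []) ++ pvKeep (d :: r)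

lemma pvKeep_append_nondash (p : List Char) (c : Char) (hc : c ≠ '-') :
    pvKeep (p ++ [c]) = pvKeep p ++ [c] := by
  induction p using pvKeep.induct with
  | case1 => simp [pvKeep, hc]
  | case2 => simp [pvKeep, hc]
  | case3 a ha => simp [pvKeep, ha, hc]
  | case4 a b r ih => simpa [pvKeep] using ih

lemma pvKeep_append_dash (p : List Char) (hp : p.getLast? = some '-') :
    pvKeep (p ++ ['-']) = pvKeep p := by
  induction p using pvKeep.induct with
  | case1 => simp at hp
  | case2 => simp [pvKeep]
  | case3 a ha => simp at hp; exact absurd hp ha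
  | case4 a b r ih => simpa [pvKeep] using ih (by simpa using hp)

lemma pvKeep_append_pair (p : List Char) (c : Char) (hc : c ≠ '-') :
    pvKeep (p ++ [c, '-']) = pvKeep p := by
  induction p using pvKeep.induct with
  | case1 => simp [pvKeep, hc]
  | case2 => simp [pvKeep, hc]
  | case3 a ha => simp [pvKeep, ha, hc]
  | case4 a b r ih => simpa [pvKeep] using ih

lemma pvLoopA_nonpos (s : List Char) (i : Int) (h : ¬ i > 0) : pvLoopA s i = s := by
  rw [pvLoopA]; simp [h]

-- loop invariant: positions right of i are dash-free, position 0 is not a dash;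
-- then the loop produces pvKeep of the unprocessed prefix, with the suffix untouched
lemma pvGetLeft (s l2 : List Char) (a j : Nat) (hja : j < a) (hj : j < s.length)
    (h : j < (s.take a ++ l2).length) : (s.take a ++ l2)[j] = s[j] := by
  rw [List.getElem_append_left (by simp; omega)]
  simp

lemma pvGetRight (s : List Char) (a b j : Nat) (hb : b ≤ s.length) (hab : a ≤ j)
    (ha : a ≤ s.length) (h : j < (s.take a ++ s.drop b).length) :
    (s.take a ++ s.drop b)[j] = s[b + (j - a)]'(by simp at h; omega) := by
  rw [List.getElem_append_right (by simp; omega)]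
  simp only [List.getElem_drop]
  congr 1
  simp; omega

lemma pvTakeSucc (s : List Char) (n : Nat) (h : n < s.length) :
    s.take (n + 1) = s.take n ++ [s[n]] := by
  rw [List.take_add_one]; simp [List.getElem?_eq_getElem h]

-- loop invariant: positions right of i are dash-free, position 0 is not a dash;
-- then the loop produces pvKeep of the unprocessed prefix, with the suffix untouched
lemma pvLoopA_eq_pvKeep (i : Nat) : ∀ (s : List Char), i < s.length →
    (∀ (h0 : 0 < s.length), s[0] ≠ '-') →
    (∀ j (hj : j < s.length), i < j → s[j] ≠ '-') →
    pvLoopA s (i : Int) = pvKeep (s.take (i + 1)) ++ s.drop (i + 1) := by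
  induction i using Nat.strong_induction_on with
  | _ i IH =>
  intro s hi h0 hsuf
  have hslen : 0 < s.length := by omega
  rcases Nat.eq_zero_or_pos i with hz | hpos
  · subst hz
    have hc0 : ((0 : Nat) : Int) = 0 := by norm_num
    rw [hc0, pvLoopA_nonpos s 0 (by omega)]
    have ht1 : s.take (0 + 1) = s.take 0 ++ [s[0]] := pvTakeSucc s 0 hslen
    rw [ht1]
    have hk : pvKeep ([] ++ [s[0]]) = [s[0]] := by simp [pvKeep, h0 hslen]
    simp only [List.take_zero] at *
    rw [hk]
    simpa using (List.getElem_cons_drop (as := s) (i := 0) hslen).symm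
  · have hcast1 : ((i : Nat) : Int) - 1 = ((i - 1 : Nat) : Int) := by omega
    have hIm1 : i - 1 < s.length := by omega
    rw [pvLoopA, if_pos (by exact_mod_cast hpos)]
    by_cases hci : s[i] = '-'
    · rw [if_pos (by simp [List.getElem?_eq_getElem hi, hci])]
      by_cases hcim : s[i-1] = '-'
      · -- second char of a dash pair: delete just this dash
        have hige2 : 2 ≤ i := by
          by_contra h2
          have hi1 : i = 1 := by omega
          exact (h0 hslen) (by simpa [hi1] using hcim)
        rw [if_pos (by rw [hcast1]; simp [List.getElem?_eq_getElem hIm1, hcim])]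
        have hslice : PySem.List.slice s none (some (i:Int)) ++ PySem.List.slice s (some ((i:Int)+1)) none
            = s.take i ++ s.drop (i+1) := by
          have h1 : ((i:Int)+1) = ((i+1 : Nat) : Int) := by push_cast; ring
          rw [PySem.List.slice_to_natCast, h1, PySem.List.slice_from_natCast]
        rw [hslice, hcast1]
        have hrec := IH (i-1) (by omega) (s.take i ++ s.drop (i+1)) (by simp; omega)
          (by intro hh
              rw [pvGetLeft s _ i 0 (by omega) (by omega) hh]
              exact h0 hslen)
          (by intro j hj hgt
              rw [pvGetRight s i (i+1) j (by omega) (by omega) (by omega) hj]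
              exact hsuf _ _ (by omega))
        rw [hrec]
        have htk : (s.take i ++ s.drop (i+1)).take (i - 1 + 1) = s.take i := by
          have he : i - 1 + 1 = i := by omega
          rw [he, List.take_left' (by simp; omega)]
        have hdr : (s.take i ++ s.drop (i+1)).drop (i - 1 + 1) = s.drop (i+1) := by
          have he : i - 1 + 1 = i := by omega
          rw [he, List.drop_left' (by simp; omega)]
        rw [htk, hdr]
        congr 1
        have hlast : (s.take i).getLast? = some '-' := by
          rw [List.getLast?_eq_getElem?]
          have hlt : (s.take i).length = i := by simp; omega
          rw [hlt, List.getElem?_take_of_lt (by omega), List.getElem?_eq_getElem hIm1, hcim]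
        have hts : s.take (i+1) = s.take i ++ ['-'] := by
          rw [pvTakeSucc s i hi, hci]
        rw [hts]
        exact (pvKeep_append_dash _ hlast).symm
      · -- dash after a non-dash: delete both
        rw [if_neg (by rw [hcast1]; simp [List.getElem?_eq_getElem hIm1, hcim])]
        have hslice : PySem.List.slice s none (some ((i:Int)-1)) ++ PySem.List.slice s (some ((i:Int)+1)) none
            = s.take (i-1) ++ s.drop (i+1) := by
          have h1 : ((i:Int)+1) = ((i+1 : Nat) : Int) := by push_cast; ring
          rw [hcast1, h1, PySem.List.slice_to_natCast, PySem.List.slice_from_natCast]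
        rw [hslice]
        rcases Nat.lt_or_ge i 2 with h2 | h2
        · -- i = 1: the loop ends with index -1
          have hi1 : i = 1 := by omega
          subst hi1
          rw [pvLoopA_nonpos _ _ (by omega)]
          have hts : s.take (1+1) = s.take 1 ++ [s[1]'hi] := pvTakeSucc s 1 hi
          have ht1 : s.take (0+1) = s.take 0 ++ [s[0]] := pvTakeSucc s 0 hslen
          simp only [List.take_zero, List.nil_append] at ht1
          rw [hts, ht1, hci]
          have hk : pvKeep ([s[0]] ++ ['-']) = [] := by simp [pvKeep]
          rw [hk]
          simp
        · -- i ≥ 2: recurse at i-2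
          have hcast2 : ((i : Nat) : Int) - 1 - 1 = ((i - 2 : Nat) : Int) := by omega
          rw [hcast2]
          have hrec := IH (i-2) (by omega) (s.take (i-1) ++ s.drop (i+1)) (by simp; omega)
            (by intro hh
                rw [pvGetLeft s _ (i-1) 0 (by omega) (by omega) hh]
                exact h0 hslen)
            (by intro j hj hgt
                rw [pvGetRight s (i-1) (i+1) j (by omega) (by omega) (by omega) hj]
                exact hsuf _ _ (by omega))
          rw [hrec]
          have htk : (s.take (i-1) ++ s.drop (i+1)).take (i - 2 + 1) = s.take (i-1) := by
            have he : i - 2 + 1 = i - 1 := by omega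
            rw [he, List.take_left' (by simp; omega)]
          have hdr : (s.take (i-1) ++ s.drop (i+1)).drop (i - 2 + 1) = s.drop (i+1) := by
            have he : i - 2 + 1 = i - 1 := by omega
            rw [he, List.drop_left' (by simp; omega)]
          rw [htk, hdr]
          congr 1
          have h1 : s.take (i-1+1) = s.take (i-1) ++ [s[i-1]'hIm1] := pvTakeSucc s (i-1) hIm1
          have h2' : s.take i = s.take (i-1) ++ [s[i-1]'hIm1] := by
            rw [← h1]; congr 1; omega
          have h3 : s.take (i+1) = s.take (i-1) ++ [s[i-1]'hIm1, '-'] := by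
            rw [pvTakeSucc s i hi, h2', hci, List.append_assoc]
            rfl
          rw [h3]
          exact (pvKeep_append_pair _ _ hcim).symm
    · -- current char is not a dash: just step left
      rw [if_neg (by simp [List.getElem?_eq_getElem hi, hci])]
      rw [hcast1]
      have hrec := IH (i-1) (by omega) s (by omega) h0
        (by intro j hj hgt
            rcases Nat.eq_or_lt_of_le (by omega : i ≤ j) with he | hlt
            · subst he; exact hci
            · exact hsuf j hj hlt)
      rw [hrec]
      have hts : s.take (i-1+1) = s.take i := by congr 1; omega
      have hds : s.drop (i-1+1) = s.drop i := by congr 1; omega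
      rw [hts, hds]
      have htss : s.take (i+1) = s.take i ++ [s[i]] := pvTakeSucc s i hi
      rw [htss, pvKeep_append_nondash _ _ hci]
      rw [List.append_assoc]
      congr 1
      simpa using (List.getElem_cons_drop (as := s) (i := i) hi)

lemma pvCollectB_acc (ps : List (Char × Char)) (acc : List Char) :
    ps.foldl (fun out p => if p.1 ≠ '-' ∧ p.2 ≠ '-' then out ++ [p.1] else out) acc
      = acc ++ ps.foldl (fun out p => if p.1 ≠ '-' ∧ p.2 ≠ '-' then out ++ [p.1] else out) [] := by
  induction ps generalizing acc with
  | nil => simp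
  | cons p ps ih =>
    simp only [List.foldl_cons]
    rw [ih, ih (if p.1 ≠ '-' ∧ p.2 ≠ '-' then [] ++ [p.1] else [])]
    split_ifs <;> simp

lemma pvCollectB_eq_pvKeep (t : List Char) : pvCollectB t = pvKeep t := by
  induction t using pvKeep.induct with
  | case1 => simp [pvCollectB, pvKeep]
  | case2 => simp [pvCollectB, pvKeep]
  | case3 c hc => simp [pvCollectB, pvKeep, hc]
  | case4 c d r ih =>
    simp only [pvCollectB, List.drop_succ_cons, List.drop_zero, List.zip_cons_cons,
      List.foldl_cons, List.getLast?_cons_cons] at *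
    rw [pvCollectB_acc]
    simp only [pvKeep]
    rw [← ih]
    split_ifs <;> simp [pvCollectB]

lemma pvStripA_eq_dropWhile (l : List Char) : pvStripA l = l.dropWhile (· = '-') := by
  induction l with
  | nil => rfl
  | cons c cs ih => by_cases hc : c = '-' <;> simp [pvStripA, List.dropWhile_cons, hc, ih]

-- ===== VERDICT (by name: the statement is the Claim_ definition above) =====
theorem backspace_spec : Claim_equal_backspace := by
  intro s _ hpre
  unfold Spec_backspace backspace backspace_alt
  rw [pvStripA_eq_dropWhile]
  have htne : s.toList.dropWhile (· = '-') ≠ [] := by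
    intro h
    obtain ⟨c, hc, hcne⟩ := List.any_eq_true.mp hpre
    exact (by simpa using hcne : c ≠ '-') (by simpa using (List.dropWhile_eq_nil_iff.mp h) c hc)
  have h0 : ∀ (h0 : 0 < (s.toList.dropWhile (· = '-')).length),
      (s.toList.dropWhile (· = '-'))[0] ≠ '-' := by
    intro h0
    have := List.head_dropWhile_not (p := (· = '-')) (l := s.toList) htne
    simpa [List.head_eq_getElem] using this
  generalize hT : s.toList.dropWhile (· = '-') = t at *
  have hlen : 0 < t.length := List.length_pos_iff.mpr htne
  have hcast : ((t.length : Int) - 1) = ((t.length - 1 : Nat) : Int) := by omega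
  show String.mk (pvLoopA t ((t.length : Int) - 1)) = String.mk (pvCollectB t)
  rw [hcast, pvLoopA_eq_pvKeep (t.length - 1) t (by omega) h0 (by intro j hj hgt; omega)]
  rw [pvCollectB_eq_pvKeep]
  have h1 : t.length - 1 + 1 = t.length := by omega
  simp [h1]
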